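-- pv_equiv track=rewrite | github.com/Chopinsky/algo-problems | challenges/3999/3725-count-ways-to-choose-coprime-integers-from-rows.py | countCoprime
-- ===== SOURCE A (Python) =====
-- from typing import List
-- from collections import Counter
-- from math import gcd
--
-- def countCoprime(mat: List[List[int]]) -> int:
--   mod = 10**9 + 7
--   cnt = Counter(mat[0])
--
--   for row in mat[1:]:
--     nxt = Counter()
--     for v1 in row:
--       for v0, c in cnt.items():
--         g = gcd(v0, v1)
--         nxt[g] = (nxt[g] + c) % mod
--
--     cnt = nxt
--
--   return cnt[1]
-- ===== SOURCE B (Python) =====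
-- from typing import List
-- from math import gcd
--
-- def countCoprime(mat: List[List[int]]) -> int:
--   mod = 10**9 + 7
--   if len(mat) == 1:
--     return mat[0].count(1)
--
--   # forward pass: distinct reachable prefix-gcd states after each row
--   levels = [list(dict.fromkeys(mat[0]))]
--   for row in mat[1:]:
--     levels.append(list(dict.fromkeys(gcd(g, v) for g in levels[-1] for v in row)))
--
--   # backward pass: f[g] = (#ways to extend state g through the remaining rows to gcd 1) % mod
--   f = {g: (1 if g == 1 else 0) for g in levels[-1]}
--   for row, prev in zip(reversed(mat[1:]), reversed(levels[:-1])):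
--     nf = {}
--     for g in prev:
--       t = 0
--       for v in row:
--         t += f[gcd(g, v)]
--       nf[g] = t % mod
--     f = nf
--
--   ans = 0
--   for v in mat[0]:
--     ans = (ans + f[v]) % mod
--   return ans
-- ===== Notes on version B (the rewrite author's own statement) =====
-- stated objective: alternative
-- what changed: Replaced the single forward pass that carries a Counter of prefix-gcd multiplicities by a two-phase algorithm: a forward pass computing only the deduplicated sets of reachable gcd states per level, then a backward pass computing for each state the number of completions to gcd 1, combined over the first row.
-- outside the precondition, e.g. on countCoprime([]): A raises IndexError, B raises IndexError
import Mathlib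
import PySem

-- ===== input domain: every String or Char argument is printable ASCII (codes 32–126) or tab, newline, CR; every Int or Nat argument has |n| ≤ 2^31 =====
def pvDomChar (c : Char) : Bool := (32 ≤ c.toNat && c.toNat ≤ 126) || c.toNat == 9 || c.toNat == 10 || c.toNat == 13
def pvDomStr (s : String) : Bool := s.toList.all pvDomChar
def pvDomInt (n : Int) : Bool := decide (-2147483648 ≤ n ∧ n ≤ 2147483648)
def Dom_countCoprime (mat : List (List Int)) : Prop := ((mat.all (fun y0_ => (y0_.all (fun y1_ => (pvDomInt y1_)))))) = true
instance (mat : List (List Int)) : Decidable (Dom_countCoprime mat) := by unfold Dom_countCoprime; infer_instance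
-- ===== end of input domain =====

-- B replaces A's single forward pass carrying a Counter of prefix-gcd multiplicities by a
-- two-phase algorithm (forward reachable-gcd-state sets, then a backward completion-count pass);
-- objective: alternative structure, same asymptotic cost.

-- math.gcd(a, b) = gcd(|a|, |b|) ≥ 0; exact as (Int.gcd a b : Int)
def pyGcd (a b : Int) : Int := (Int.gcd a b : Int)

-- ===== PORT A =====
-- one iteration of A's outer loop: 'nxt = Counter(); for v1 in row: for v0, c in cnt.items(): …'
def aRow (cnt : PySem.Dict Int Int) (row : List Int) : PySem.Dict Int Int :=
  row.foldl (fun nxt v1 =>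
    cnt.items.foldl (fun nxt it =>
      let g := pyGcd it.1 v1
      nxt.insert g (PySem.Int.mod (nxt.getD g 0 + it.2) 1000000007)) nxt)
    PySem.Dict.empty

def countCoprime (mat : List (List Int)) : Int :=
  match mat with
  | [] => 0  -- Python raises IndexError on mat[0] here; excluded by Pre_countCoprime
  | r0 :: rest => ((rest.foldl aRow (PySem.Dict.counter r0)).getD 1 0)

-- ===== PORT B =====
-- 'list(dict.fromkeys(gcd(g, v) for g in prev for v in row))'
def bStates (prev row : List Int) : List Int :=
  PySem.List.dedup (prev.flatMap (fun g => row.map (fun v => pyGcd g v)))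

-- one iteration of B's backward loop; rp = (row, prev); 'f[gcd(g, v)]' is ported as getD … 0:
-- the key is provably present (see bw_getD below), so Python raises no KeyError there
def bBack (f : PySem.Dict Int Int) (rp : List Int × List Int) : PySem.Dict Int Int :=
  rp.2.foldl (fun nf g =>
    nf.insert g (PySem.Int.mod (rp.1.foldl (fun t v => t + f.getD (pyGcd g v) 0) 0) 1000000007))
    PySem.Dict.empty

def countCoprime_alt (mat : List (List Int)) : Int :=
  match mat with
  | [] => 0  -- Python raises IndexError on mat[0] here; excluded by Pre_countCoprime
  | r0 :: rest =>
    if rest = [] then (PySem.List.count r0 1 : Int)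
    else
      let levels := rest.foldl (fun ls row => ls ++ [bStates (ls.getLastD []) row])
        [PySem.List.dedup r0]
      let f0 := (levels.getLastD []).foldl
        (fun d g => d.insert g (if g = 1 then (1 : Int) else 0)) PySem.Dict.empty
      let f := (rest.reverse.zip levels.dropLast.reverse).foldl bBack f0
      r0.foldl (fun ans v => PySem.Int.mod (ans + f.getD v 0) 1000000007) 0

-- ===== PRECONDITION & SPEC =====
-- A (and B) evaluate mat[0] and raise IndexError on the empty matrix; nothing else raises.
def Pre_countCoprime (mat : List (List Int)) : Prop := mat ≠ []
instance (mat : List (List Int)) : Decidable (Pre_countCoprime mat) := by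
  unfold Pre_countCoprime; infer_instance

def pvWitness_countCoprime : List (List Int) := [[2, 3], [4, 5]]

def Spec_countCoprime (mat : List (List Int)) (out : Int) : Prop := out = countCoprime_alt mat
instance (mat : List (List Int)) (out : Int) : Decidable (Spec_countCoprime mat out) := by
  unfold Spec_countCoprime; infer_instance

-- ===== CLAIM (what is proved, stated in full; the proofs are below) =====
def Claim_equal_countCoprime : Prop :=
  ∀ (mat : List (List Int)), Dom_countCoprime mat → Pre_countCoprime mat →
    Spec_countCoprime mat (countCoprime mat)

-- ===== LEMMAS AND PROOFS =====

-- the exact (unreduced) number of ways to extend gcd-state g through the remaining rows to gcd 1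
def bigN : List (List Int) → Int → Int
  | [], g => if g = 1 then 1 else 0
  | r :: rs, g => (r.map (fun v => bigN rs (pyGcd g v))).sum

theorem pv_sum_mod_map {α : Type} (l : List α) (f : α → Int) :
    ((l.map (fun a => f a % 1000000007)).sum) % 1000000007 = ((l.map f).sum) % 1000000007 := by
  induction l with
  | nil => rfl
  | cons a t ih =>
    simp only [List.map_cons, List.sum_cons]
    rw [Int.add_emod, Int.emod_emod_of_dvd _ dvd_rfl, ih, ← Int.add_emod]

theorem pv_foldl_mod_add {α : Type} (l : List α) (h : α → Int) :
    ∀ (a : Int), l.foldl (fun acc x => (acc + h x) % 1000000007) (a % 1000000007)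
      = (a + (l.map h).sum) % 1000000007 := by
  induction l with
  | nil => intro a; simp
  | cons x t ih =>
    intro a
    simp only [List.foldl_cons, List.map_cons, List.sum_cons]
    rw [Int.emod_add_emod, ih (a + h x)]
    ring_nf

theorem pv_foldl_mod_add0 {α : Type} (l : List α) (h : α → Int) :
    l.foldl (fun acc x => (acc + h x) % 1000000007) 0 = (l.map h).sum % 1000000007 := by
  have := pv_foldl_mod_add l h 0
  simpa using this

theorem pv_sum_comm {α β : Type} (l : List α) (m : List β) (f : α → β → Int) :
    (l.map (fun a => (m.map (f a)).sum)).sum = (m.map (fun b => (l.map (fun a => f a b)).sum)).sum := by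
  induction l with
  | nil => simp
  | cons a t ih =>
    simp only [List.map_cons, List.sum_cons, ih, PySem.List.sum_map_add_int]

theorem pv_count_flatMap {α β : Type} [DecidableEq β] (l : List α) (g : α → List β) (x : β) :
    ((l.flatMap g).count x) = (l.map (fun a => (g a).count x)).sum := by
  induction l with
  | nil => simp
  | cons a t ih => simp [List.flatMap_cons, List.count_append, ih]

theorem pv_sum_ind (gs : List Int) :
    (gs.map (fun g => if g = 1 then (1 : Int) else 0)).sum = (gs.count 1 : Int) := by
  induction gs with
  | nil => rfl
  | cons a t ih =>
    simp only [List.map_cons, List.sum_cons, ih, List.count_cons]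
    by_cases h : a = 1 <;> simp [h]
    omega

theorem pv_sum_indicator_nodup (l : List Int) (hl : l.Nodup) (x : Int) :
    (l.map (fun k => if x = k then (1 : Int) else 0)).sum = if x ∈ l then 1 else 0 := by
  induction l with
  | nil => simp
  | cons a t ih =>
    simp only [List.map_cons, List.sum_cons, List.mem_cons]
    have hnd := (List.nodup_cons.mp hl)
    by_cases h : x = a
    · subst h
      simp [hnd.1, ih hnd.2]
    · simp [h, ih hnd.2]

def levelsSpec : List Int → List (List Int) → List (List Int)
  | s, [] => [s]
  | s, r :: rs => s :: levelsSpec (bStates s r) rs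
def lastSt : List Int → List (List Int) → List Int
  | s, [] => s
  | s, r :: rs => lastSt (bStates s r) rs
def baseDict (t : List Int) : PySem.Dict Int Int :=
  t.foldl (fun d g => d.insert g (if g = 1 then (1 : Int) else 0)) PySem.Dict.empty
def bw : List Int → List (List Int) → PySem.Dict Int Int
  | s, [] => baseDict s
  | s, r :: rs => bBack (bw (bStates s r) rs) (r, s)

theorem pv_levels_eq (rows : List (List Int)) :
    ∀ (acc : List (List Int)) (s : List Int),
      rows.foldl (fun ls row => ls ++ [bStates (ls.getLastD []) row]) (acc ++ [s])
        = acc ++ levelsSpec s rows := by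
  induction rows with
  | nil => intro acc s; simp [levelsSpec]
  | cons r rs ih =>
    intro acc s
    simp only [List.foldl_cons, List.getLastD_concat, levelsSpec]
    have : acc ++ [s] ++ [bStates s r] = (acc ++ [s]) ++ [bStates s r] := by simp
    rw [this, ih (acc ++ [s]) (bStates s r)]
    simp

theorem pv_levelsSpec_ne_nil (s : List Int) (rows : List (List Int)) : levelsSpec s rows ≠ [] := by
  cases rows <;> simp [levelsSpec]

theorem pv_getLastD_levelsSpec (rows : List (List Int)) :
    ∀ s : List Int, (levelsSpec s rows).getLastD [] = lastSt s rows := by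
  induction rows with
  | nil => intro s; rfl
  | cons r rs ih =>
    intro s
    
    rw [levelsSpec, lastSt, ← ih (bStates s r)]
    cases h : levelsSpec (bStates s r) rs with
    | nil => exact absurd h (pv_levelsSpec_ne_nil _ _)
    | cons a l => simp

theorem pv_length_dropLast_levelsSpec (rows : List (List Int)) :
    ∀ s : List Int, (levelsSpec s rows).dropLast.length = rows.length := by
  induction rows with
  | nil => intro s; rfl
  | cons r rs ih =>
    intro s
    rw [levelsSpec, List.dropLast_cons_of_ne_nil (pv_levelsSpec_ne_nil _ _)]
    simp [ih]

theorem pv_zipfold (rows : List (List Int)) :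
    ∀ s : List Int,
      ((rows.reverse).zip ((levelsSpec s rows).dropLast.reverse)).foldl bBack (baseDict (lastSt s rows))
        = bw s rows := by
  induction rows with
  | nil => intro s; rfl
  | cons r rs ih =>
    intro s
    rw [levelsSpec, List.dropLast_cons_of_ne_nil (pv_levelsSpec_ne_nil _ _)]
    simp only [List.reverse_cons]
    rw [List.zip_append (by rw [List.length_reverse, List.length_reverse, pv_length_dropLast_levelsSpec])]
    rw [List.foldl_append]
    rw [lastSt, ih (bStates s r)]
    rfl

theorem pv_getD_foldl_insert_fun (s : List Int) (h : Int → Int) :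
    ∀ (d : PySem.Dict Int Int) (x : Int),
    (s.foldl (fun d g => d.insert g (h g)) d).getD x 0 = if x ∈ s then h x else d.getD x 0 := by
  induction s with
  | nil => intro d x; simp
  | cons a t ih =>
    intro d x
    simp only [List.foldl_cons, ih, List.mem_cons]
    by_cases hx : x ∈ t
    · simp [hx]
    · by_cases hxa : x = a
      · subst hxa; simp [hx]
      · simp [hx, hxa, PySem.Dict.getD_insert]

theorem bw_getD (rows : List (List Int)) :
    ∀ (s : List Int) (x : Int),
      (bw s rows).getD x 0 = if x ∈ s then bigN rows x % 1000000007 else 0 := by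
  induction rows with
  | nil =>
    intro s x
    show (baseDict s).getD x 0 = _
    unfold baseDict
    rw [pv_getD_foldl_insert_fun]
    by_cases hx : x ∈ s
    · simp only [hx, if_true, bigN]
      by_cases h1 : x = 1 <;> simp [h1]
    · simp [hx]
  | cons r rs ih =>
    intro s x
    show (bBack (bw (bStates s r) rs) (r, s)).getD x 0 = _
    unfold bBack
    simp only []
    rw [pv_getD_foldl_insert_fun s
      (fun g => PySem.Int.mod (r.foldl (fun t v => t + (bw (bStates s r) rs).getD (pyGcd g v) 0) 0) 1000000007)]
    by_cases hx : x ∈ s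
    · simp only [hx, if_true]
      rw [PySem.Int.mod_eq_emod_of_pos (by norm_num)]
      rw [PySem.List.foldl_add]
      have hmem : ∀ v ∈ r, (bw (bStates s r) rs).getD (pyGcd x v) 0 = bigN rs (pyGcd x v) % 1000000007 := by
        intro v hv
        rw [ih]
        have : pyGcd x v ∈ bStates s r := by
          unfold bStates
          rw [PySem.List.mem_dedup]
          exact List.mem_flatMap.mpr ⟨x, hx, List.mem_map.mpr ⟨v, hv, rfl⟩⟩
        simp [this]
      rw [List.map_congr_left hmem, zero_add, pv_sum_mod_map]
      rfl
    · simp [hx]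

theorem pv_thmB (r0 row : List Int) (rest' : List (List Int)) :
    countCoprime_alt (r0 :: row :: rest')
      = (r0.map (fun v => bigN (row :: rest') v)).sum % 1000000007 := by
  have hlev : (row :: rest').foldl (fun ls r => ls ++ [bStates (ls.getLastD []) r])
      [PySem.List.dedup r0] = levelsSpec (PySem.List.dedup r0) (row :: rest') := by
    have := pv_levels_eq (row :: rest') [] (PySem.List.dedup r0)
    simpa using this
  have hbase : ∀ t : List Int,
      t.foldl (fun d g => d.insert g (if g = 1 then (1 : Int) else 0)) PySem.Dict.empty = baseDict t :=
    fun _ => rfl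
  simp only [countCoprime_alt, if_neg (show ¬ (row :: rest' = ([] : List (List Int))) by simp),
    hlev, pv_getLastD_levelsSpec, hbase, pv_zipfold (row :: rest') (PySem.List.dedup r0)]
  have hfold : r0.foldl (fun ans v => PySem.Int.mod (ans + (bw (PySem.List.dedup r0) (row :: rest')).getD v 0) 1000000007) 0
      = r0.foldl (fun ans v => (ans + bigN (row :: rest') v % 1000000007) % 1000000007) 0 := by
    apply PySem.List.foldl_congr_mem
    intro acc v hv
    rw [PySem.Int.mod_eq_emod_of_pos (by norm_num), bw_getD, if_pos (by rw [PySem.List.mem_dedup]; exact hv)]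
  rw [hfold, pv_foldl_mod_add0 r0 (fun v => bigN (row :: rest') v % 1000000007), pv_sum_mod_map]

def updFold (us : List (Int × Int)) (d : PySem.Dict Int Int) : PySem.Dict Int Int :=
  us.foldl (fun d kc => d.insert kc.1 ((d.getD kc.1 0 + kc.2) % 1000000007)) d
def usOf (cnt : PySem.Dict Int Int) (row : List Int) : List (Int × Int) :=
  row.flatMap (fun v1 => cnt.items.map (fun it => (pyGcd it.1 v1, it.2)))
def Ssum (us : List (Int × Int)) (g : Int) : Int := ((us.filter (fun kc => kc.1 == g)).map (·.2)).sum
def Astep (gs : List Int) (row : List Int) : List Int :=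
  row.flatMap (fun v1 => gs.map (fun g0 => pyGcd g0 v1))
def AInv (cnt : PySem.Dict Int Int) (gs : List Int) : Prop :=
  (∀ g, cnt.getD g 0 % 1000000007 = ((gs.count g : Nat) : Int) % 1000000007) ∧
  (∀ g, g ∈ gs → cnt.contains g = true) ∧
  (∀ g, 0 ≤ cnt.getD g 0) ∧ cnt.keys.Nodup

theorem pv_foldl_flat {α : Type} (row : List α) (q : α → List (Int × Int)) :
    ∀ d : PySem.Dict Int Int,
      row.foldl (fun d v => updFold (q v) d) d = updFold (row.flatMap q) d := by
  induction row with
  | nil => intro d; rfl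
  | cons a t ih =>
    intro d
    simp only [List.foldl_cons, List.flatMap_cons, updFold, List.foldl_append]
    exact ih _

theorem pv_aRow_eq (cnt : PySem.Dict Int Int) (row : List Int) :
    aRow cnt row = updFold (usOf cnt row) PySem.Dict.empty := by
  unfold aRow usOf
  rw [← pv_foldl_flat row (fun v1 => cnt.items.map (fun it => (pyGcd it.1 v1, it.2)))]
  apply PySem.List.foldl_congr_mem
  intro nxt v1 _
  rw [updFold, List.foldl_map]
  apply PySem.List.foldl_congr_mem
  intro d it _
  simp only [PySem.Int.mod_eq_emod_of_pos (by norm_num : (0:Int) < 1000000007)]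

theorem pv_updFold_getD_mod (us : List (Int × Int)) :
    ∀ (d : PySem.Dict Int Int) (g : Int),
      (updFold us d).getD g 0 % 1000000007 = (d.getD g 0 + Ssum us g) % 1000000007 := by
  induction us with
  | nil => intro d g; simp [updFold, Ssum]
  | cons kc t ih =>
    intro d g
    have hstep : updFold (kc :: t) d
        = updFold t (d.insert kc.1 ((d.getD kc.1 0 + kc.2) % 1000000007)) := rfl
    rw [hstep, ih]
    by_cases hk : g = kc.1
    · subst hk
      rw [PySem.Dict.getD_insert_self]
      have hS : Ssum (kc :: t) kc.1 = kc.2 + Ssum t kc.1 := by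
        simp [Ssum]
      rw [hS]
      omega
    · rw [PySem.Dict.getD_insert]
      simp only [if_neg hk]
      have : Ssum (kc :: t) g = Ssum t g := by
        simp only [Ssum, List.filter_cons]
        rw [if_neg (by simpa using (fun h => hk h.symm))]
      rw [this]

theorem pv_updFold_contains (us : List (Int × Int)) :
    ∀ (d : PySem.Dict Int Int) (g : Int),
      (updFold us d).contains g = (d.contains g || us.any (fun kc => kc.1 == g)) := by
  induction us with
  | nil => intro d g; simp [updFold]
  | cons kc t ih =>
    intro d g
    have hstep : updFold (kc :: t) d
        = updFold t (d.insert kc.1 ((d.getD kc.1 0 + kc.2) % 1000000007)) := rfl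
    rw [hstep, ih, PySem.Dict.contains_insert]
    simp [Bool.or_left_comm, Bool.or_assoc, BEq.comm]

theorem pv_updFold_bounds (us : List (Int × Int)) :
    ∀ (d : PySem.Dict Int Int) (g : Int),
      (updFold us d).getD g 0 = d.getD g 0 ∨
        (0 ≤ (updFold us d).getD g 0 ∧ (updFold us d).getD g 0 < 1000000007) := by
  induction us with
  | nil => intro d g; left; rfl
  | cons kc t ih =>
    intro d g
    have hstep : updFold (kc :: t) d
        = updFold t (d.insert kc.1 ((d.getD kc.1 0 + kc.2) % 1000000007)) := rfl
    rw [hstep]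
    rcases ih (d.insert kc.1 ((d.getD kc.1 0 + kc.2) % 1000000007)) g with h | h
    · rw [h, PySem.Dict.getD_insert]
      by_cases hk : g = kc.1
      · right
        simp only [if_pos hk]
        exact ⟨Int.emod_nonneg _ (by norm_num), Int.emod_lt_of_pos _ (by norm_num)⟩
      · left; simp [hk]
    · right; exact h

theorem pv_updFold_nodup (us : List (Int × Int)) (d : PySem.Dict Int Int) (h : d.keys.Nodup) :
    (updFold us d).keys.Nodup :=
  PySem.Dict.nodup_keys_foldl_insert_key us (fun kc => kc.1)
    (fun d kc => (d.getD kc.1 0 + kc.2) % 1000000007) d h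

theorem pv_sum_map_modcong {α : Type} (l : List α) (f h : α → Int)
    (hc : ∀ x ∈ l, f x % 1000000007 = h x % 1000000007) :
    (l.map f).sum % 1000000007 = (l.map h).sum % 1000000007 := by
  induction l with
  | nil => rfl
  | cons a t ih =>
    simp only [List.map_cons, List.sum_cons]
    rw [Int.add_emod, hc a (List.mem_cons_self), ih (fun x hx => hc x (List.mem_cons_of_mem a hx)),
      ← Int.add_emod, Int.add_emod (h a), ← ih (fun x hx => hc x (List.mem_cons_of_mem a hx)),
      ih (fun x hx => hc x (List.mem_cons_of_mem a hx)), ← Int.add_emod]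

theorem pv_Ssum_append (a b : List (Int × Int)) (g : Int) :
    Ssum (a ++ b) g = Ssum a g + Ssum b g := by
  simp [Ssum, List.filter_append]

theorem pv_Ssum_flatMap {α : Type} (l : List α) (q : α → List (Int × Int)) (g : Int) :
    Ssum (l.flatMap q) g = (l.map (fun a => Ssum (q a) g)).sum := by
  induction l with
  | nil => rfl
  | cons a t ih => simp [List.flatMap_cons, pv_Ssum_append, ih]



theorem pv_W (K : List Int) (hK : K.Nodup) (q : Int → Bool) :
    ∀ gs : List Int, (∀ x ∈ gs, x ∈ K) →
    ((K.filter q).map (fun k => ((gs.count k : Nat) : Int))).sum = ((gs.countP q : Nat) : Int) := by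
  intro gs
  induction gs with
  | nil => intro _; simp
  | cons x t ih =>
    intro hsub
    have hsubt : ∀ y ∈ t, y ∈ K := fun y hy => hsub y (List.mem_cons_of_mem x hy)
    have hcnt : ∀ k : Int, (((x :: t).count k : Nat) : Int)
        = ((t.count k : Nat) : Int) + (if x = k then (1:Int) else 0) := by
      intro k
      rw [List.count_cons]
      by_cases hxk : x = k <;> simp [hxk]
    have hmap : ((K.filter q).map (fun k => (((x :: t).count k : Nat) : Int))).sum
        = ((K.filter q).map (fun k => ((t.count k : Nat) : Int))).sum
          + ((K.filter q).map (fun k => if x = k then (1:Int) else 0)).sum := by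
      rw [← PySem.List.sum_map_add_int]
      exact congrArg _ (List.map_congr_left (fun k _ => hcnt k))
    rw [hmap, ih hsubt]
    have hind : ((K.filter q).map (fun k => if x = k then (1:Int) else 0)).sum
        = if q x then 1 else 0 := by
      rw [pv_sum_indicator_nodup _ (hK.filter q)]
      by_cases hq : q x
      · rw [if_pos (List.mem_filter.mpr ⟨hsub x List.mem_cons_self, hq⟩), if_pos hq]
      · rw [if_neg (fun hmem => hq (List.mem_filter.mp hmem).2), if_neg hq]
    rw [hind, List.countP_cons]
    by_cases hq : q x <;> simp [hq]

theorem pv_cast_sum_map {α : Type} (l : List α) (f : α → Nat) :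
    (((l.map f).sum : Nat) : Int) = (l.map (fun a => ((f a : Nat) : Int))).sum := by
  induction l with
  | nil => rfl
  | cons a t ih => simp [ih]

theorem pv_sum_flatMap {α : Type} (l : List α) (q : α → List Int) :
    (l.flatMap q).sum = (l.map (fun a => (q a).sum)).sum := by
  induction l with
  | nil => rfl
  | cons a t ih => simp [List.flatMap_cons, ih]

theorem pv_count_map (gs : List Int) (f : Int → Int) (g : Int) :
    (gs.map f).count g = gs.countP (fun x => f x == g) := by
  rw [List.count, List.countP_map]; rfl

theorem pv_astep (cnt : PySem.Dict Int Int) (gs : List Int) (row : List Int) (h : AInv cnt gs) :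
    AInv (aRow cnt row) (Astep gs row) ∧
      (∀ g, 0 ≤ (aRow cnt row).getD g 0 ∧ (aRow cnt row).getD g 0 < 1000000007) := by
  obtain ⟨hmod, hcont, hpos, hnd⟩ := h
  have hitems : cnt.items = cnt.keys.map (fun k => (k, cnt.getD k 0)) :=
    PySem.Dict.items_eq_map_keys cnt hnd 0
  have hb : ∀ v1 g, Ssum (cnt.items.map (fun it => (pyGcd it.1 v1, it.2))) g
      = ((cnt.keys.filter (fun k => pyGcd k v1 == g)).map (fun k => cnt.getD k 0)).sum := by
    intro v1 g
    rw [hitems]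
    unfold Ssum
    simp [List.filter_map, List.map_map, Function.comp_def]
  have hsub : ∀ x ∈ gs, x ∈ cnt.keys := by
    intro x hx
    exact (PySem.Dict.contains_iff_mem_keys cnt x).mp (hcont x hx)
  have hCI : ∀ g, Ssum (usOf cnt row) g % 1000000007
      = (((Astep gs row).count g : Nat) : Int) % 1000000007 := by
    intro g
    show Ssum (row.flatMap (fun v1 => cnt.items.map (fun it => (pyGcd it.1 v1, it.2)))) g % 1000000007 = _
    rw [pv_Ssum_flatMap]
    have hc : (Astep gs row).count g
        = (row.map (fun v1 => (gs.map (fun g0 => pyGcd g0 v1)).count g)).sum :=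
      pv_count_flatMap row _ g
    rw [hc, pv_cast_sum_map]
    apply pv_sum_map_modcong
    intro v1 _
    rw [hb v1 g]
    rw [pv_sum_map_modcong _ _ (fun k => ((gs.count k : Nat) : Int)) (fun k _ => hmod k)]
    rw [pv_W cnt.keys hnd _ gs hsub]
    rw [pv_count_map]
  have hbounds : ∀ g, 0 ≤ (aRow cnt row).getD g 0 ∧ (aRow cnt row).getD g 0 < 1000000007 := by
    intro g
    rw [pv_aRow_eq]
    rcases pv_updFold_bounds (usOf cnt row) PySem.Dict.empty g with hcase | hcase
    · rw [hcase]; simp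
    · exact hcase
  refine ⟨⟨?_, ?_, fun g => (hbounds g).1, ?_⟩, hbounds⟩
  · intro g
    rw [pv_aRow_eq, pv_updFold_getD_mod]
    simp only [PySem.Dict.getD_empty, zero_add]
    exact hCI g
  · intro g hg
    rw [pv_aRow_eq, pv_updFold_contains]
    simp only [PySem.Dict.contains_empty, Bool.false_or]
    obtain ⟨v1, hv1, hg2⟩ := List.mem_flatMap.mp hg
    obtain ⟨g0, hg0, hgeq⟩ := List.mem_map.mp hg2
    have hkmem : g0 ∈ cnt.keys := hsub g0 hg0
    have hitmem : (g0, cnt.getD g0 0) ∈ cnt.items := by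
      rw [hitems]; exact List.mem_map.mpr ⟨g0, hkmem, rfl⟩
    have husmem : (pyGcd g0 v1, cnt.getD g0 0) ∈ usOf cnt row :=
      List.mem_flatMap.mpr ⟨v1, hv1, List.mem_map.mpr ⟨(g0, cnt.getD g0 0), hitmem, rfl⟩⟩
    exact List.any_of_mem husmem (by simp [hgeq])
  · rw [pv_aRow_eq]
    exact pv_updFold_nodup _ _ (by simp)

theorem pv_afold (rows : List (List Int)) :
    ∀ (cnt : PySem.Dict Int Int) (gs : List Int), AInv cnt gs →
      AInv (rows.foldl aRow cnt) (rows.foldl Astep gs) ∧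
        (rows = [] ∨ ∀ g, 0 ≤ (rows.foldl aRow cnt).getD g 0 ∧
          (rows.foldl aRow cnt).getD g 0 < 1000000007) := by
  induction rows with
  | nil => intro cnt gs h; exact ⟨h, Or.inl rfl⟩
  | cons r rs ih =>
    intro cnt gs h
    obtain ⟨hstep, hbnd⟩ := pv_astep cnt gs r h
    obtain ⟨hinv, hrest⟩ := ih (aRow cnt r) (Astep gs r) hstep
    refine ⟨hinv, Or.inr ?_⟩
    cases rs with
    | nil => exact hbnd
    | cons a l => exact hrest.resolve_left (by simp)

theorem pv_AInv_counter (r0 : List Int) : AInv (PySem.Dict.counter r0) r0 := by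
  refine ⟨?_, ?_, ?_, PySem.Dict.nodup_keys_counter r0⟩
  · intro g; rw [PySem.Dict.getD_counter]
  · intro g hg
    rw [PySem.Dict.contains_counter]
    exact List.elem_eq_true_of_mem hg
  · intro g
    rw [PySem.Dict.getD_counter]
    exact Int.natCast_nonneg _




theorem pv_count_to_bigN (rows : List (List Int)) :
    ∀ gs : List Int,
      (((rows.foldl Astep gs).count 1 : Nat) : Int) = (gs.map (fun g => bigN rows g)).sum := by
  induction rows with
  | nil =>
    intro gs
    rw [List.foldl_nil, ← pv_sum_ind gs]
    exact congrArg _ (List.map_congr_left (fun g _ => by rw [bigN]))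
  | cons r rs ih =>
    intro gs
    rw [List.foldl_cons, ih (Astep gs r)]
    show ((Astep gs r).map (fun g => bigN rs g)).sum = _
    unfold Astep
    rw [List.map_flatMap]
    simp only [List.map_map, Function.comp_def]
    rw [pv_sum_flatMap, pv_sum_comm]
    exact congrArg _ (List.map_congr_left (fun g _ => by simp [bigN]))

theorem pv_thmA (r0 row : List Int) (rest' : List (List Int)) :
    countCoprime (r0 :: row :: rest')
      = (r0.map (fun v => bigN (row :: rest') v)).sum % 1000000007 := by
  show ((row :: rest').foldl aRow (PySem.Dict.counter r0)).getD 1 0 = _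
  obtain ⟨hinv, hbnd⟩ := pv_afold (row :: rest') (PySem.Dict.counter r0) r0 (pv_AInv_counter r0)
  have hbnd' := hbnd.resolve_left (by simp)
  have h1 := hinv.1 1
  rw [Int.emod_eq_of_lt (hbnd' 1).1 (hbnd' 1).2] at h1
  rw [h1, pv_count_to_bigN]

-- ===== VERDICT (by name: the statement is the Claim_ definition above) =====
theorem countCoprime_spec : Claim_equal_countCoprime := by
  intro mat _ hpre
  unfold Spec_countCoprime
  match mat with
  | [] => exact absurd rfl hpre
  | [r0] =>
    show countCoprime [r0] = countCoprime_alt [r0]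
    simp [countCoprime, countCoprime_alt, PySem.Dict.getD_counter, PySem.List.count_eq]
  | r0 :: row :: rest' =>
    rw [pv_thmA, pv_thmB]
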